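-- pv_equiv track=rewrite | github.com/pypi-data/pypi-mirror-386 | packages/rustybt/rustybt-0.3.2-cp312-cp312-macosx_15_0_arm64.whl/rustybt/data/adapters/utils.py | build_symbol_sid_map
-- ===== SOURCE A (Python) =====
-- from collections.abc import Iterable
--
-- def build_symbol_sid_map(symbols: Iterable[str]) -> dict[str, int]:
--     """Build deterministic SID mapping for symbols."""
--     mapping: dict[str, int] = {}
--     next_sid = 1
--
--     for symbol in symbols:
--         normalized_symbol = symbol.upper().strip()
--         if normalized_symbol not in mapping:
--             mapping[normalized_symbol] = next_sid
--             next_sid += 1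
--
--     return mapping
-- ===== SOURCE B (Python) =====
-- def build_symbol_sid_map(symbols):
--     """Build deterministic SID mapping for symbols."""
--     norm = [s.upper().strip() for s in symbols]
--     # reverse pass: last write wins, so each symbol ends up mapped to its FIRST index
--     first = {}
--     for i in range(len(norm) - 1, -1, -1):
--         first[norm[i]] = i
--     ordered = sorted(first, key=first.get)
--     return {sym: sid for sid, sym in enumerate(ordered, 1)}
-- ===== Notes on version B (the rewrite author's own statement) =====
-- stated objective: alternative
-- what changed: Replaces A's single stateful pass (seen-dict membership guard plus a manual next_sid counter) by a different algorithm: a reverse last-write-wins index pass that records each normalized symbol's first-occurrence index, then sorts the unique symbols by that index and enumerates them from 1.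
import Mathlib
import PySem

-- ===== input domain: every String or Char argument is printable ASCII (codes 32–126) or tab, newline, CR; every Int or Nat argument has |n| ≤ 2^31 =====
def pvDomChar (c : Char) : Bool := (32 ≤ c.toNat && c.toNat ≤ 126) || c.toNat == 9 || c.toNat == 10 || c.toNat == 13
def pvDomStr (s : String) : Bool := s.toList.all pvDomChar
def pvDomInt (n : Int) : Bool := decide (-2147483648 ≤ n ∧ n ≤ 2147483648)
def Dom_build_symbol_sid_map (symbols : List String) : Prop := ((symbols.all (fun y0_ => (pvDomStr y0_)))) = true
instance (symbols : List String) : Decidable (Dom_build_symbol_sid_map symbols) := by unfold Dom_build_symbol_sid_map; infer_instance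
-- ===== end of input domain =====

-- B replaces A's single stateful pass (seen-dict guard + manual next_sid counter) by a
-- different algorithm: a reverse last-write-wins pass records each normalized symbol's
-- first-occurrence index, then the unique symbols are sorted by that index and enumerated from 1.

-- ===== PORT A =====
-- literal port of A: one pass keeping (mapping, next_sid), insert on first sight
def build_symbol_sid_map (symbols : List String) : List (String × Int) :=
  (symbols.foldl
    (fun (st : PySem.Dict String Int × Int) symbol =>
      let normalized_symbol := PySem.Str.strip (PySem.Str.upper symbol)
      if st.1.contains normalized_symbol then st
      else (st.1.insert normalized_symbol st.2, st.2 + 1))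
    (PySem.Dict.empty, 1)).1.items

-- ===== PORT B =====
-- literal port of B.  'norm[i]' has i drawn from range(len(norm)-1, -1, -1), always in
-- range, so pyGetD with default "" is exact there; 'first.get k' is applied only to keys
-- of 'first', where it always hits, so it is ported as 'first.getD k 0'.
def build_symbol_sid_map_alt (symbols : List String) : List (String × Int) :=
  let norm := symbols.map (fun s => PySem.Str.strip (PySem.Str.upper s))
  let first := (PySem.List.pyRange (PySem.List.len norm - 1) (-1) (-1)).foldl
      (fun (d : PySem.Dict String Int) i => d.insert (PySem.List.pyGetD norm i "") i)
      PySem.Dict.empty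
  let ordered := PySem.List.sorted first.keys (fun k => first.getD k 0)
  (PySem.List.enumerate ordered 1).map (fun p => (p.2, p.1))

-- ===== PRECONDITION & SPEC =====
def Spec_build_symbol_sid_map (symbols : List String) (out : List (String × Int)) : Prop := out = build_symbol_sid_map_alt symbols
instance (symbols : List String) (out : List (String × Int)) : Decidable (Spec_build_symbol_sid_map symbols out) := by unfold Spec_build_symbol_sid_map; infer_instance

-- ===== CLAIM (what is proved, stated in full; the proofs are below) =====
def Claim_equal_build_symbol_sid_map : Prop := ∀ (symbols : List String), Dom_build_symbol_sid_map symbols → Spec_build_symbol_sid_map symbols (build_symbol_sid_map symbols)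

-- ===== LEMMAS AND PROOFS =====

-- first-occurrence dedup against a set of already-seen keys
def pvDA (seen : List String) : List String → List String
  | [] => []
  | x :: xs => if x ∈ seen then pvDA seen xs else x :: pvDA (seen ++ [x]) xs

theorem pv_foldl_add_eq_pvDA (xs : List String) : ∀ (seen : List String),
    xs.foldl PySem.Set.add seen = seen ++ pvDA seen xs := by
  induction xs with
  | nil => intro seen; simp [pvDA]
  | cons x xs ih =>
    intro seen
    simp only [List.foldl_cons, pvDA, PySem.Set.add_eq_ite]
    by_cases h : x ∈ seen
    · simp [h, ih seen]
    · simp [h, ih (seen ++ [x])]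

theorem pv_dedup_eq_pvDA (xs : List String) : PySem.Set.ofList xs = pvDA [] xs := by
  have := pv_foldl_add_eq_pvDA xs []
  simpa [PySem.Set.ofList_eq_foldl] using this

-- A's loop produces exactly the first-occurrence list, enumerated from next_sid
theorem pv_loop_items (syms : List String) : ∀ (d : PySem.Dict String Int) (n : Int),
    (syms.foldl
      (fun (st : PySem.Dict String Int × Int) symbol =>
        let normalized_symbol := PySem.Str.strip (PySem.Str.upper symbol)
        if st.1.contains normalized_symbol then st
        else (st.1.insert normalized_symbol st.2, st.2 + 1))
      (d, n)).1.items
    = d.items ++ (PySem.List.enumerate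
        (pvDA d.keys (syms.map (fun s => PySem.Str.strip (PySem.Str.upper s)))) n).map
        (fun p => (p.2, p.1)) := by
  induction syms with
  | nil => intro d n; simp [pvDA]
  | cons s rest ih =>
    intro d n
    simp only [List.foldl_cons, List.map_cons, pvDA]
    by_cases h : d.contains (PySem.Str.strip (PySem.Str.upper s)) = true
    · have hmem : PySem.Str.strip (PySem.Str.upper s) ∈ d.keys :=
        (PySem.Dict.contains_iff_mem_keys d _).mp h
      simp [h, hmem, ih d n]
    · have hmem : PySem.Str.strip (PySem.Str.upper s) ∉ d.keys := by
        intro hm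
        exact h ((PySem.Dict.contains_iff_mem_keys d _).mpr hm)
      have hc : d.contains (PySem.Str.strip (PySem.Str.upper s)) = false := by
        simpa using h
      simp [h, hmem, ih (d.insert (PySem.Str.strip (PySem.Str.upper s)) n) (n + 1),
            PySem.Dict.items_insert_of_not_contains _ _ hc,
            PySem.Dict.keys_insert_of_not_contains _ _ hc,
            PySem.List.enumerate_cons, List.append_assoc]

-- first-occurrence (symbol, index) pairs of an enumerated list, against seen
def pvFB (seen : List String) : List (Int × String) → List (String × Int)
  | [] => []
  | (i, x) :: ps => if x ∈ seen then pvFB seen ps else (x, i) :: pvFB (seen ++ [x]) ps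

theorem pvFB_not_mem_seen : ∀ (ps : List (Int × String)) (seen : List String) (s : String) (i : Int),
    (s, i) ∈ pvFB seen ps → s ∉ seen := by
  intro ps
  induction ps with
  | nil => intro seen s i h; simp [pvFB] at h
  | cons p ps ih =>
    intro seen s i h
    obtain ⟨j, x⟩ := p
    simp only [pvFB] at h
    by_cases hx : x ∈ seen
    · simp [hx] at h; exact ih seen s i h
    · simp [hx] at h
      rcases h with ⟨hs, _⟩ | h
      · subst hs; exact hx
      · intro hmem; exact ih (seen ++ [x]) s i h (by simp [hmem])

theorem pvFB_map_fst : ∀ (ps : List (Int × String)) (seen : List String),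
    (pvFB seen ps).map (·.1) = pvDA seen (ps.map (·.2)) := by
  intro ps
  induction ps with
  | nil => intro seen; simp [pvFB, pvDA]
  | cons p ps ih =>
    intro seen
    obtain ⟨j, x⟩ := p
    simp only [pvFB, List.map_cons, pvDA]
    by_cases hx : x ∈ seen
    · simp [hx, ih seen]
    · simp [hx, ih (seen ++ [x])]

theorem pvFB_find? : ∀ (ps : List (Int × String)) (seen : List String) (s : String) (i : Int),
    (s, i) ∈ pvFB seen ps → ps.find? (fun p => p.2 == s) = some (i, s) := by
  intro ps
  induction ps with
  | nil => intro seen s i h; simp [pvFB] at h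
  | cons p ps ih =>
    intro seen s i h
    obtain ⟨j, x⟩ := p
    simp only [pvFB] at h
    by_cases hx : x ∈ seen
    · simp only [hx, if_true] at h
      have hns : s ∉ seen := pvFB_not_mem_seen ps seen s i h
      have hne : x ≠ s := fun he => hns (he ▸ hx)
      simp [hne, ih seen s i h]
    · simp only [hx, if_false] at h
      rcases List.mem_cons.mp h with he | h
      · simp only [Prod.mk.injEq] at he
        obtain ⟨hs, hi⟩ := he
        subst hs; subst hi
        simp
      · have hns : s ∉ seen ++ [x] := pvFB_not_mem_seen ps (seen ++ [x]) s i h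
        have hne : x ≠ s := fun he => hns (by simp [he])
        simp [hne, ih (seen ++ [x]) s i h]

theorem pvFB_snd_mem : ∀ (ps : List (Int × String)) (seen : List String) (p : String × Int),
    p ∈ pvFB seen ps → ∃ q ∈ ps, p.2 = q.1 := by
  intro ps
  induction ps with
  | nil => intro seen p h; simp [pvFB] at h
  | cons q ps ih =>
    intro seen p h
    obtain ⟨j, x⟩ := q
    simp only [pvFB] at h
    by_cases hx : x ∈ seen
    · simp only [hx, if_true] at h
      obtain ⟨r, hr, he⟩ := ih seen p h
      exact ⟨r, List.mem_cons_of_mem _ hr, he⟩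
    · simp only [hx, if_false] at h
      rcases List.mem_cons.mp h with he | h
      · exact ⟨(j, x), List.mem_cons_self, by simp [he]⟩
      · obtain ⟨r, hr, he⟩ := ih (seen ++ [x]) p h
        exact ⟨r, List.mem_cons_of_mem _ hr, he⟩

theorem pvFB_pairwise : ∀ (ps : List (Int × String)) (seen : List String),
    ps.Pairwise (fun p q => p.1 < q.1) → (pvFB seen ps).Pairwise (fun a b => a.2 < b.2) := by
  intro ps
  induction ps with
  | nil => intro seen _; simp [pvFB]
  | cons p ps ih =>
    intro seen hp
    obtain ⟨j, x⟩ := p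
    obtain ⟨hhead, htail⟩ := List.pairwise_cons.mp hp
    simp only [pvFB]
    by_cases hx : x ∈ seen
    · simp only [hx, if_true]; exact ih seen htail
    · simp only [hx, if_false]
      refine List.pairwise_cons.mpr ⟨?_, ih (seen ++ [x]) htail⟩
      intro b hb
      obtain ⟨q, hq, he⟩ := pvFB_snd_mem ps (seen ++ [x]) b hb
      simpa [he] using hhead q hq

-- characterization of B's reverse last-write-wins index pass
theorem pv_first_dict (norm : List String) : ∀ (m : Nat), m ≤ norm.length → ∀ (d : PySem.Dict String Int),
    (∀ s, ((PySem.List.pyRange ((m : Int) - 1) (-1) (-1)).foldl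
        (fun d i => d.insert (PySem.List.pyGetD norm i "") i) d).get? s
      = (((PySem.List.enumerate (norm.take m) 0).find? (fun p => p.2 == s)).map (·.1)).or (d.get? s))
    ∧ (∀ s, s ∈ ((PySem.List.pyRange ((m : Int) - 1) (-1) (-1)).foldl
        (fun d i => d.insert (PySem.List.pyGetD norm i "") i) d).keys ↔ s ∈ norm.take m ∨ s ∈ d.keys)
    ∧ (d.keys.Nodup → ((PySem.List.pyRange ((m : Int) - 1) (-1) (-1)).foldl
        (fun d i => d.insert (PySem.List.pyGetD norm i "") i) d).keys.Nodup) := by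
  intro m
  induction m with
  | zero =>
    intro _ d
    rw [PySem.List.pyRange_neg_one_eq_nil (by norm_num)]
    simp
  | succ m ih =>
    intro hm d
    have hmlt : m < norm.length := hm
    have hcons : PySem.List.pyRange (((m : Nat) + 1 : Nat) - 1 : Int) (-1) (-1)
        = ((m : Nat) : Int) :: PySem.List.pyRange (((m : Nat) : Int) - 1) (-1) (-1) := by
      push_cast
      rw [show ((m : Int) + 1 - 1) = (m : Int) by ring]
      exact PySem.List.pyRange_neg_one_cons (by omega)
    have hmle : m ≤ norm.length := Nat.le_of_succ_le hm
    have hget : PySem.List.pyGetD norm ((m : Nat) : Int) "" = norm[m] := by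
      rw [PySem.List.pyGetD_natCast]
      exact List.getD_eq_getElem norm "" hmlt
    have htake : norm.take (m + 1) = norm.take m ++ [norm[m]] := by
      rw [List.take_add_one, List.getElem?_eq_getElem hmlt]
      rfl
    have hlen : (norm.take m).length = m := by simp [hmle]
    have henum : PySem.List.enumerate (norm.take (m + 1)) 0
        = PySem.List.enumerate (norm.take m) 0 ++ [(((m : Nat) : Int), norm[m])] := by
      rw [htake, PySem.List.enumerate_append, hlen]
      simp [PySem.List.enumerate_cons, PySem.List.enumerate_nil]
    obtain ⟨ihg, ihk, ihn⟩ :=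
      ih hmle (d.insert (PySem.List.pyGetD norm ((m : Nat) : Int) "") ((m : Nat) : Int))
    refine ⟨?_, ?_, ?_⟩
    · intro s
      rw [hcons]
      simp only [List.foldl_cons]
      rw [ihg s, henum, List.find?_append]
      cases hf : (PySem.List.enumerate (norm.take m) 0).find? (fun p => p.2 == s) with
      | some p => simp
      | none =>
        simp only [Option.none_or]
        rw [hget, PySem.Dict.get?_insert]
        by_cases hs : s = norm[m]
        · subst hs
          simp
        · have hne : (norm[m] == s) = false := by
            simp only [beq_eq_false_iff_ne, ne_eq]
            exact fun he => hs he.symm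
          simp [hne, hs]
    · intro s
      rw [hcons]
      simp only [List.foldl_cons]
      rw [ihk s, htake, hget]
      simp only [PySem.Dict.mem_keys_insert, List.mem_append, List.mem_singleton]
      tauto
    · intro hnd
      rw [hcons]
      simp only [List.foldl_cons]
      exact ihn (PySem.Dict.nodup_keys_insert _ _ _ hnd)

-- B's sort of the unique symbols by first-occurrence index IS the first-occurrence order
theorem pv_sorted_eq (norm : List String) :
    PySem.List.sorted
      ((PySem.List.pyRange ((norm.length : Int) - 1) (-1) (-1)).foldl
        (fun (d : PySem.Dict String Int) i => d.insert (PySem.List.pyGetD norm i "") i)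
        PySem.Dict.empty).keys
      (fun k => ((PySem.List.pyRange ((norm.length : Int) - 1) (-1) (-1)).foldl
        (fun (d : PySem.Dict String Int) i => d.insert (PySem.List.pyGetD norm i "") i)
        PySem.Dict.empty).getD k 0)
    = pvDA [] norm := by
  obtain ⟨hg, hk, hn⟩ := pv_first_dict norm norm.length le_rfl PySem.Dict.empty
  simp only [List.take_length, PySem.Dict.get?_empty, Option.or_none, PySem.Dict.keys_empty,
    List.not_mem_nil, or_false] at hg hk
  have hnodup : (pvDA [] norm).Nodup := by
    rw [← pv_dedup_eq_pvDA]
    exact PySem.Set.nodup_ofList norm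
  have hmemDA : ∀ a, a ∈ pvDA [] norm ↔ a ∈ norm := by
    intro a
    rw [← pv_dedup_eq_pvDA]
    exact PySem.Set.mem_ofList norm a
  have hkey : ∀ p ∈ pvFB [] (PySem.List.enumerate norm 0),
      ((PySem.List.pyRange ((norm.length : Int) - 1) (-1) (-1)).foldl
        (fun (d : PySem.Dict String Int) i => d.insert (PySem.List.pyGetD norm i "") i)
        PySem.Dict.empty).getD p.1 0 = p.2 := by
    intro p hp
    have hf := pvFB_find? (PySem.List.enumerate norm 0) [] p.1 p.2 (by simpa using hp)
    rw [PySem.Dict.getD_eq_get?_getD, hg p.1, hf]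
    rfl
  apply PySem.List.sorted_eq_of_perm_of_pairwise_lt
  · rw [List.perm_ext_iff_of_nodup hnodup (hn (by simp [PySem.Dict.keys_empty]))]
    intro a
    rw [hk a, hmemDA a]
  · have h1 : pvDA [] norm = (pvFB [] (PySem.List.enumerate norm 0)).map (·.1) := by
      rw [pvFB_map_fst, PySem.List.map_snd_enumerate]
    rw [h1, List.pairwise_map]
    have hpw := pvFB_pairwise (PySem.List.enumerate norm 0) []
      (PySem.List.pairwise_lt_enumerate norm 0)
    refine List.Pairwise.imp_of_mem ?_ hpw
    intro a b ha hb hab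
    rw [hkey a ha, hkey b hb]
    exact hab

-- ===== VERDICT (by name: the statement is the Claim_ definition above) =====
theorem build_symbol_sid_map_spec : Claim_equal_build_symbol_sid_map := by
  intro symbols _
  unfold Spec_build_symbol_sid_map build_symbol_sid_map build_symbol_sid_map_alt
  rw [pv_loop_items]
  simp only [PySem.List.len_eq, pv_sorted_eq]
  simp [PySem.Dict.empty]
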